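-- pv_equiv track=rewrite | github.com/Marsh1173/Proj6 | Project 05/TSPSolver.py | findUnsatisfiedVertices
-- ===== SOURCE A (Python) =====
-- def findUnsatisfiedVertices(MinSpanTree, cityCount):
--
--     cityDegreeArray = [0] * cityCount
--
--     for i in range(cityCount):
--         for j in range(cityCount):
--             if i in MinSpanTree and j in MinSpanTree[i]:
--                 cityDegreeArray[i] -= 1
--                 cityDegreeArray[j] += 1
--
--     return cityDegreeArray
-- ===== SOURCE B (Python) =====
-- def findUnsatisfiedVertices(MinSpanTree, cityCount):
--     deg = [0] * cityCount
--     for i, adj in MinSpanTree.items():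
--         if 0 <= i < cityCount:
--             seen = set()
--             for j in adj:
--                 if 0 <= j < cityCount and j not in seen:
--                     seen.add(j)
--                     deg[i] -= 1
--                     deg[j] += 1
--     return deg
-- ===== Notes on version B (the rewrite author's own statement) =====
-- stated objective: faster
-- what changed: Instead of scanning all cityCount^2 (i,j) pairs and testing dict membership for each, B iterates once over the stored adjacency lists, using a seen-set per vertex to count each distinct in-range neighbour once.
import Mathlib
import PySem

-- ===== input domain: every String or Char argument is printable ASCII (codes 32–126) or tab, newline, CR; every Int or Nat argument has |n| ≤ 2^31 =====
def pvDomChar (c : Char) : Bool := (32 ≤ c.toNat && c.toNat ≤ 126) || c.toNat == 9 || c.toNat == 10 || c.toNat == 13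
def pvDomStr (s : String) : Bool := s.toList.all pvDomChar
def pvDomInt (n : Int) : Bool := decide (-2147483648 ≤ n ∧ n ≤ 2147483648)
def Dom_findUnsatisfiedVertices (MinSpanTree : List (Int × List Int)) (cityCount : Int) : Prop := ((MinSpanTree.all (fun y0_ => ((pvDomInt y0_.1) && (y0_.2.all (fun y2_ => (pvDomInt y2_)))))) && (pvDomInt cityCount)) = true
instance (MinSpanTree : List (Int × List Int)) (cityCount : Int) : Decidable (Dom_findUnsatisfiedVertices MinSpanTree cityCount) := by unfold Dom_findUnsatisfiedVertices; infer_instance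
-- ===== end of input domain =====

-- B replaces A's cityCount × cityCount scan of all (i,j) pairs by a single pass over the
-- stored adjacency lists (a per-vertex seen-set counts each distinct in-range neighbour once).

-- shared helper: 'arr[k] += d' (Python list indexing semantics)
def pvBump (arr : List Int) (k : Int) (d : Int) : List Int :=
  PySem.List.pySetD arr k (PySem.List.pyGetD arr k 0 + d)

-- ===== PORT A =====
def findUnsatisfiedVertices (MinSpanTree : List (Int × List Int)) (cityCount : Int) : List Int :=
  (PySem.List.pyRange 0 cityCount 1).foldl (fun arr i =>
    (PySem.List.pyRange 0 cityCount 1).foldl (fun arr j =>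
      match (PySem.Dict.mk MinSpanTree).get? i with
      | some adj => if j ∈ adj then pvBump (pvBump arr i (-1)) j 1 else arr
      | none => arr) arr)
    (List.replicate cityCount.toNat (0 : Int))

-- ===== PORT B =====
def findUnsatisfiedVertices_alt (MinSpanTree : List (Int × List Int)) (cityCount : Int) : List Int :=
  MinSpanTree.foldl (fun deg p =>
    if 0 ≤ p.1 ∧ p.1 < cityCount then
      (p.2.foldl (fun (st : List Int × PySem.Set Int) j =>
        if (0 ≤ j ∧ j < cityCount) ∧ j ∉ st.2 then
          (pvBump (pvBump st.1 p.1 (-1)) j 1, st.2.add j)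
        else st) (deg, (PySem.Set.empty : PySem.Set Int))).1
    else deg)
    (List.replicate cityCount.toNat (0 : Int))

-- ===== PRECONDITION & SPEC =====
-- Pre_ excludes association lists with duplicate keys: they do not encode a Python dict
-- (dict construction collapses duplicate keys), so no behaviour of A is defined for them.
def Pre_findUnsatisfiedVertices (MinSpanTree : List (Int × List Int)) (cityCount : Int) : Prop :=
  (MinSpanTree.map Prod.fst).Nodup
instance (MinSpanTree : List (Int × List Int)) (cityCount : Int) : Decidable (Pre_findUnsatisfiedVertices MinSpanTree cityCount) := by unfold Pre_findUnsatisfiedVertices; infer_instance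
def pvWitness_findUnsatisfiedVertices : (List (Int × List Int)) × Int := ([(0, [1, 2]), (1, [0])], 3)

def Spec_findUnsatisfiedVertices (MinSpanTree : List (Int × List Int)) (cityCount : Int) (out : List Int) : Prop := out = findUnsatisfiedVertices_alt MinSpanTree cityCount
instance (MinSpanTree : List (Int × List Int)) (cityCount : Int) (out : List Int) : Decidable (Spec_findUnsatisfiedVertices MinSpanTree cityCount out) := by unfold Spec_findUnsatisfiedVertices; infer_instance

-- ===== CLAIM (what is proved, stated in full; the proofs are below) =====
def Claim_equal_findUnsatisfiedVertices : Prop := ∀ (MinSpanTree : List (Int × List Int)) (cityCount : Int), Dom_findUnsatisfiedVertices MinSpanTree cityCount → Pre_findUnsatisfiedVertices MinSpanTree cityCount → Spec_findUnsatisfiedVertices MinSpanTree cityCount (findUnsatisfiedVertices MinSpanTree cityCount)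

-- ===== LEMMAS AND PROOFS =====

-- the elementary update both loops perform for an edge (i, j): arr[i] -= 1; arr[j] += 1
def pvOp (arr : List Int) (p : Int × Int) : List Int :=
  pvBump (pvBump arr p.1 (-1)) p.2 1

-- the edge list A processes, in A's order
def pvLA (MinSpanTree : List (Int × List Int)) (n : Int) : List (Int × Int) :=
  (PySem.List.pyRange 0 n 1).flatMap (fun i =>
    match (PySem.Dict.mk MinSpanTree).get? i with
    | some adj => ((PySem.List.pyRange 0 n 1).filter (fun j => decide (j ∈ adj))).map (fun j => (i, j))
    | none => [])

-- the edge list B processes, in B's order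
def pvLB (MinSpanTree : List (Int × List Int)) (n : Int) : List (Int × Int) :=
  MinSpanTree.flatMap (fun p =>
    if 0 ≤ p.1 ∧ p.1 < n then
      (PySem.Set.ofList (p.2.filter (fun j => decide (0 ≤ j ∧ j < n)))).map (fun j => (p.1, j))
    else [])

theorem pvBump_nonneg (arr : List Int) (k d : Int) (hk : 0 ≤ k) :
    pvBump arr k d = arr.set k.toNat (arr.getD k.toNat 0 + d) := by
  unfold pvBump
  rw [PySem.List.pySetD_of_nonneg arr _ hk, PySem.List.pyGetD_of_nonneg arr _ hk]

theorem pvBump_comm (arr : List Int) (a b d e : Int) (ha : 0 ≤ a) (hb : 0 ≤ b) :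
    pvBump (pvBump arr a d) b e = pvBump (pvBump arr b e) a d := by
  rw [pvBump_nonneg _ _ _ ha, pvBump_nonneg _ _ _ hb,
      pvBump_nonneg _ _ _ hb, pvBump_nonneg _ _ _ ha]
  generalize a.toNat = na
  generalize b.toNat = nb
  apply List.ext_getElem?
  intro m
  by_cases hab : na = nb
  · subst hab
    by_cases hlt : na < arr.length
    · simp only [List.getD_eq_getElem?_getD, List.getElem?_set, List.length_set]
      split_ifs <;> simp_all
      all_goals ring_nf
    · rw [List.set_eq_of_length_le (by rw [List.length_set]; omega),
          List.set_eq_of_length_le (by omega),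
          List.set_eq_of_length_le (by rw [List.length_set]; omega),
          List.set_eq_of_length_le (by omega)]
  · simp only [List.getD_eq_getElem?_getD, List.getElem?_set, List.length_set]
    split_ifs <;> simp_all

theorem pvOp_comm (arr : List Int) (p q : Int × Int)
    (hp : 0 ≤ p.1 ∧ 0 ≤ p.2) (hq : 0 ≤ q.1 ∧ 0 ≤ q.2) :
    pvOp (pvOp arr p) q = pvOp (pvOp arr q) p := by
  unfold pvOp
  rw [pvBump_comm _ _ _ _ _ hp.2 hq.1, pvBump_comm _ _ _ _ _ hp.1 hq.1,
      pvBump_comm _ _ _ _ _ hp.2 hq.2, pvBump_comm _ _ _ _ _ hp.1 hq.2]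

-- foldl respects permutations when the step commutes on the elements present
theorem pvFoldl_perm {α β : Type} (f : β → α → β) {l₁ l₂ : List α} (hp : l₁.Perm l₂)
    (H : ∀ x ∈ l₁, ∀ y ∈ l₁, ∀ a, f (f a x) y = f (f a y) x) :
    ∀ b, l₁.foldl f b = l₂.foldl f b := by
  induction hp with
  | nil => intro b; rfl
  | cons x _ ih =>
    intro b
    exact ih (fun u hu v hv a => H u (by simp [hu]) v (by simp [hv]) a) (f b x)
  | swap x y l =>
    intro b
    simp only [List.foldl_cons]
    rw [H y (by simp) x (by simp) b]
  | trans h₁ _ ih₁ ih₂ =>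
    intro b
    rw [ih₁ H b, ih₂ (fun u hu v hv a => H u (h₁.mem_iff.mpr hu) v (h₁.mem_iff.mpr hv) a) b]

-- ===== A's fold is foldl pvOp over pvLA =====
theorem pvA_eq (MinSpanTree : List (Int × List Int)) (n : Int) :
    findUnsatisfiedVertices MinSpanTree n
      = (pvLA MinSpanTree n).foldl pvOp (List.replicate n.toNat (0 : Int)) := by
  unfold findUnsatisfiedVertices pvLA
  rw [List.foldl_flatMap]
  apply PySem.List.foldl_congr_mem
  intro arr i _
  cases h : (PySem.Dict.mk MinSpanTree).get? i with
  | none => simp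
  | some adj =>
    rw [List.foldl_map]
    rw [← PySem.List.foldl_ite_eq_foldl_filter (fun j => j ∈ adj) (fun arr j => pvOp arr (i, j))]
    rfl

-- ===== B's inner loop, with its seen-set, processes exactly the fresh in-range neighbours =====
theorem pvSet_discard_filter {s : PySem.Set Int} (X : List Int) (j : Int) :
    (X.filter (fun y => !(PySem.Set.contains (s.add j) y)))
      = ((PySem.Set.discard X j).filter (fun y => !(PySem.Set.contains s y))) := by
  unfold PySem.Set.discard
  rw [List.filter_filter]
  apply List.filter_congr
  intro y _
  by_cases hy : y ∈ s <;> by_cases hyj : y = j <;>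
    simp [PySem.Set.mem_add, hy, hyj]

theorem pvB_inner (i n : Int) (adj : List Int) : ∀ (arr : List Int) (seen : PySem.Set Int),
    adj.foldl (fun (st : List Int × PySem.Set Int) j =>
        if (0 ≤ j ∧ j < n) ∧ j ∉ st.2 then
          (pvBump (pvBump st.1 i (-1)) j 1, st.2.add j)
        else st) (arr, seen)
      = (((((PySem.Set.ofList (adj.filter (fun j => decide (0 ≤ j ∧ j < n)))).filter
            (fun y => !(PySem.Set.contains seen y)))).map (fun j => (i, j))).foldl pvOp arr,
         seen.update (adj.filter (fun j => decide (0 ≤ j ∧ j < n)))) := by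
  induction adj with
  | nil => intro arr seen; simp [PySem.Set.update]
  | cons j t ih =>
    intro arr seen
    rw [List.foldl_cons, List.filter_cons]
    by_cases hr : (0 ≤ j ∧ j < n)
    · have hd : decide (0 ≤ j ∧ j < n) = true := by simpa using hr
      rw [if_pos hd]
      by_cases hs : j ∈ seen
      · have hc : seen.contains j = true := (PySem.Set.contains_iff seen j).mpr hs
        rw [if_neg (fun h => h.2 hs), ih arr seen, PySem.Set.ofList_cons, List.filter_cons]
        rw [if_neg (by simp; exact hs)]
        have hfil := pvSet_discard_filter (s := seen)
          (PySem.Set.ofList (t.filter (fun j => decide (0 ≤ j ∧ j < n)))) j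
        rw [PySem.Set.add_of_mem hs] at hfil
        rw [← hfil, PySem.Set.update_cons, PySem.Set.add_of_mem hs]
      · have hc : seen.contains j = false := by
          cases h' : seen.contains j
          · rfl
          · exact absurd ((PySem.Set.contains_iff seen j).mp h') hs
        rw [if_pos ⟨hr, hs⟩]
        rw [ih (pvBump (pvBump arr i (-1)) j 1) (seen.add j), PySem.Set.ofList_cons,
            List.filter_cons, if_pos (by simp; exact hs),
            ← pvSet_discard_filter (s := seen)
              (PySem.Set.ofList (t.filter (fun j => decide (0 ≤ j ∧ j < n)))) j,
            PySem.Set.update_cons, List.map_cons, List.foldl_cons]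
        rfl
    · have hd : ¬ (decide (0 ≤ j ∧ j < n) = true) := by simpa using hr
      rw [if_neg hd, if_neg (fun h => hr h.1)]
      exact ih arr seen

theorem pvB_eq (MinSpanTree : List (Int × List Int)) (n : Int) :
    findUnsatisfiedVertices_alt MinSpanTree n
      = (pvLB MinSpanTree n).foldl pvOp (List.replicate n.toNat (0 : Int)) := by
  unfold findUnsatisfiedVertices_alt pvLB
  rw [List.foldl_flatMap]
  apply PySem.List.foldl_congr_mem
  intro deg p _
  by_cases hp : 0 ≤ p.1 ∧ p.1 < n
  · have hemp : ∀ X : List Int, X.filter (fun y => !(PySem.Set.contains (PySem.Set.empty : PySem.Set Int) y)) = X := by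
      intro X; simp [PySem.Set.empty, PySem.Set.contains]
    rw [if_pos hp]; rw [if_pos hp]
    rw [pvB_inner p.1 n p.2 deg PySem.Set.empty, hemp]
  · simp [hp]

-- ===== membership characterisations and Nodup, then pvLA ~ pvLB =====
theorem pvMem_LA (MinSpanTree : List (Int × List Int)) (n : Int) (q : Int × Int) :
    q ∈ pvLA MinSpanTree n ↔
      (0 ≤ q.1 ∧ q.1 < n) ∧ (0 ≤ q.2 ∧ q.2 < n) ∧
        (∃ adj, (PySem.Dict.mk MinSpanTree).get? q.1 = some adj ∧ q.2 ∈ adj) := by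
  unfold pvLA
  simp only [List.mem_flatMap, PySem.List.mem_pyRange_one]
  constructor
  · rintro ⟨i, hi, hq⟩
    cases h : (PySem.Dict.mk MinSpanTree).get? i with
    | none => rw [h] at hq; simp at hq
    | some adj =>
      rw [h] at hq
      simp only [List.mem_map, List.mem_filter, PySem.List.mem_pyRange_one, decide_eq_true_eq] at hq
      obtain ⟨j, ⟨hj, hja⟩, rfl⟩ := hq
      exact ⟨hi, hj, adj, h, hja⟩
  · rintro ⟨h1, h2, adj, hget, hmem⟩
    refine ⟨q.1, h1, ?_⟩
    rw [hget]
    simp only [List.mem_map, List.mem_filter, PySem.List.mem_pyRange_one, decide_eq_true_eq]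
    exact ⟨q.2, ⟨h2, hmem⟩, rfl⟩

theorem pvMem_LB (MinSpanTree : List (Int × List Int)) (n : Int) (q : Int × Int) :
    q ∈ pvLB MinSpanTree n ↔
      (0 ≤ q.1 ∧ q.1 < n) ∧ (0 ≤ q.2 ∧ q.2 < n) ∧
        (∃ adj, (q.1, adj) ∈ MinSpanTree ∧ q.2 ∈ adj) := by
  unfold pvLB
  simp only [List.mem_flatMap]
  constructor
  · rintro ⟨p, hpmem, hq⟩
    by_cases hp : 0 ≤ p.1 ∧ p.1 < n
    · rw [if_pos hp] at hq
      simp only [List.mem_map] at hq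
      obtain ⟨j, hj, rfl⟩ := hq
      rw [PySem.Set.mem_ofList, List.mem_filter, decide_eq_true_eq] at hj
      exact ⟨hp, hj.2, p.2, by simpa using hpmem, hj.1⟩
    · rw [if_neg hp] at hq; simp at hq
  · rintro ⟨h1, h2, adj, hmem, hja⟩
    refine ⟨(q.1, adj), hmem, ?_⟩
    rw [if_pos h1]
    simp only [List.mem_map]
    exact ⟨q.2, by rw [PySem.Set.mem_ofList, List.mem_filter]; exact ⟨hja, by simpa using h2⟩, rfl⟩

theorem pvNodup_LA (MinSpanTree : List (Int × List Int)) (n : Int) :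
    (pvLA MinSpanTree n).Nodup := by
  unfold pvLA
  rw [List.nodup_flatMap]
  constructor
  · intro i _
    cases h : (PySem.Dict.mk MinSpanTree).get? i with
    | none => simp
    | some adj =>
      refine List.Nodup.map (fun a b hab => by simpa using hab) ?_
      exact (PySem.List.nodup_pyRange_one 0 n).filter _
  · refine List.Pairwise.imp ?_ (PySem.List.nodup_pyRange_one 0 n)
    intro i j hij q hqi hqj
    cases h1 : (PySem.Dict.mk MinSpanTree).get? i with
    | none => simp only [h1] at hqi; simp at hqi
    | some adj =>
      simp only [h1] at hqi
      cases h2 : (PySem.Dict.mk MinSpanTree).get? j with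
      | none => simp only [h2] at hqj; simp at hqj
      | some adj2 =>
        simp only [h2] at hqj
        simp only [List.mem_map] at hqi hqj
        obtain ⟨_, _, rfl⟩ := hqi
        obtain ⟨_, _, he⟩ := hqj
        exact hij (by simpa using congrArg Prod.fst he.symm)

theorem pvNodup_LB (MinSpanTree : List (Int × List Int)) (n : Int)
    (hnd : (MinSpanTree.map Prod.fst).Nodup) :
    (pvLB MinSpanTree n).Nodup := by
  unfold pvLB
  rw [List.nodup_flatMap]
  constructor
  · intro p _
    by_cases hp : 0 ≤ p.1 ∧ p.1 < n
    · rw [if_pos hp]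
      exact List.Nodup.map (fun a b hab => by simpa using hab) (PySem.Set.nodup_ofList _)
    · rw [if_neg hp]; simp
  · have hpw : MinSpanTree.Pairwise (fun p p' => p.1 ≠ p'.1) := List.pairwise_map.mp hnd
    refine List.Pairwise.imp ?_ hpw
    intro p p' hne q hqp hqp'
    by_cases hp : 0 ≤ p.1 ∧ p.1 < n
    · by_cases hp' : 0 ≤ p'.1 ∧ p'.1 < n
      · simp only [if_pos hp] at hqp; simp only [if_pos hp'] at hqp'
        simp only [List.mem_map] at hqp hqp'
        obtain ⟨_, _, rfl⟩ := hqp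
        obtain ⟨_, _, he⟩ := hqp'
        exact hne (by simpa using congrArg Prod.fst he.symm)
      · simp only [if_neg hp'] at hqp'; simp at hqp'
    · simp only [if_neg hp] at hqp; simp at hqp

theorem pvPerm (MinSpanTree : List (Int × List Int)) (n : Int)
    (hnd : (MinSpanTree.map Prod.fst).Nodup) :
    (pvLA MinSpanTree n).Perm (pvLB MinSpanTree n) := by
  rw [List.perm_ext_iff_of_nodup (pvNodup_LA MinSpanTree n) (pvNodup_LB MinSpanTree n hnd)]
  intro q
  rw [pvMem_LA, pvMem_LB]
  have hkeys : ((PySem.Dict.mk MinSpanTree).keys).Nodup := hnd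
  constructor
  · rintro ⟨h1, h2, adj, hget, hja⟩
    exact ⟨h1, h2, adj, ((PySem.Dict.get?_eq_some_iff_mem_items _ _ _ hkeys).mp hget), hja⟩
  · rintro ⟨h1, h2, adj, hmem, hja⟩
    exact ⟨h1, h2, adj, ((PySem.Dict.get?_eq_some_iff_mem_items _ _ _ hkeys).mpr hmem), hja⟩

-- ===== VERDICT (by name: the statement is the Claim_ definition above) =====
theorem findUnsatisfiedVertices_spec : Claim_equal_findUnsatisfiedVertices := by
  intro MinSpanTree cityCount _ hpre
  unfold Spec_findUnsatisfiedVertices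
  rw [pvA_eq, pvB_eq]
  apply pvFoldl_perm pvOp (pvPerm MinSpanTree cityCount hpre)
  intro x hx y hy a
  have hxm := (pvMem_LA MinSpanTree cityCount x).mp hx
  have hym := (pvMem_LA MinSpanTree cityCount y).mp hy
  exact pvOp_comm a x y ⟨hxm.1.1, hxm.2.1.1⟩ ⟨hym.1.1, hym.2.1.1⟩
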